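-- pv_equiv track=rewrite | github.com/aizwellenstan/ib-auto-trading-pub | modules/trade/futures.py | GetExtreamOp
-- ===== SOURCE A (Python) =====
-- def GetExtreamOp(signal, vol, op, sl, tick_val=5):
--     extreamOp = op
--     for i in range(1, vol + 1):
--         if signal == 1:
--             if op <= sl:
--                 sl = op - tick_val
--         else:
--             if op >= sl:
--                 sl = op + tick_val
--         extreamOp = op
--         if signal == 1:
--             op -= tick_val
--             sl += tick_val
--         else:
--             op += tick_val
--             sl -= tick_val
--     return extreamOp
-- ===== SOURCE B (Python) =====
-- def GetExtreamOp(sig, vol, op, sl, tick_val=5):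
--     if vol < 1:
--         return op
--     step = -tick_val if sig == 1 else tick_val
--     return op + (vol - 1) * step
-- ===== Notes on version B (the rewrite author's own statement) =====
-- stated objective: faster
-- what changed: Replaced the O(vol) tick-stepping loop (which also tracks an sl variable that never affects the result) with the closed form op + (vol-1)*step, step = -tick_val if signal==1 else tick_val.
import Mathlib
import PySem

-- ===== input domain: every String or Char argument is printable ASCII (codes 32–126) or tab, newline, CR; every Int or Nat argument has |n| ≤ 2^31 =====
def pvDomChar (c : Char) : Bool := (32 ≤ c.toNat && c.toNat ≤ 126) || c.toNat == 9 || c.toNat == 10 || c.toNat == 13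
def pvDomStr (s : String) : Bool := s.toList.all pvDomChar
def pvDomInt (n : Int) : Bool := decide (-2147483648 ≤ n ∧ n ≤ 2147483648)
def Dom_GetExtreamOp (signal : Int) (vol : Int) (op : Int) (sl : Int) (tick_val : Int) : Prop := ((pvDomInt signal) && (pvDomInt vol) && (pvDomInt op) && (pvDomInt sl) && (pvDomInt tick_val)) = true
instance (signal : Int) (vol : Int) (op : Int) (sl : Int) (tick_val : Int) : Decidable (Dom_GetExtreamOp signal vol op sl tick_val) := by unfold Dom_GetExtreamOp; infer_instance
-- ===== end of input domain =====

-- B replaces A's O(vol) tick-stepping loop with the O(1) closed form op ± (vol-1)*tick_val.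


-- ===== PORT A =====
-- literal transliteration: for-loop over range(1, vol+1) carrying (extreamOp, op, sl)
def GetExtreamOp (signal : Int) (vol : Int) (op : Int) (sl : Int) (tick_val : Int) : Int :=
  let st := (PySem.List.pyRange 1 (vol + 1) 1).foldl
    (fun (st : Int × Int × Int) _ =>
      let extreamOp := st.1
      let op := st.2.1
      let sl := st.2.2
      let sl := if signal = 1 then (if op ≤ sl then op - tick_val else sl)
                else (if op ≥ sl then op + tick_val else sl)
      let extreamOp := op
      if signal = 1 then (extreamOp, op - tick_val, sl + tick_val)
      else (extreamOp, op + tick_val, sl - tick_val))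
    (op, op, sl)
  st.1

-- ===== PORT B =====
def GetExtreamOp_alt (signal : Int) (vol : Int) (op : Int) (sl : Int) (tick_val : Int) : Int :=
  if vol < 1 then op
  else
    let step := if signal = 1 then -tick_val else tick_val
    op + (vol - 1) * step

-- ===== PRECONDITION & SPEC =====
def Spec_GetExtreamOp (signal : Int) (vol : Int) (op : Int) (sl : Int) (tick_val : Int) (out : Int) : Prop := out = GetExtreamOp_alt signal vol op sl tick_val
instance (signal : Int) (vol : Int) (op : Int) (sl : Int) (tick_val : Int) (out : Int) : Decidable (Spec_GetExtreamOp signal vol op sl tick_val out) := by unfold Spec_GetExtreamOp; infer_instance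

-- ===== CLAIM (what is proved, stated in full; the proofs are below) =====
def Claim_equal_GetExtreamOp : Prop := ∀ (signal : Int) (vol : Int) (op : Int) (sl : Int) (tick_val : Int), Dom_GetExtreamOp signal vol op sl tick_val → Spec_GetExtreamOp signal vol op sl tick_val (GetExtreamOp signal vol op sl tick_val)

-- ===== LEMMAS AND PROOFS =====

-- The loop body, named for the proofs.
def pvBody (signal tick_val : Int) : Int × Int × Int → Int → Int × Int × Int :=
  fun st _ =>
    let extreamOp := st.1
    let op := st.2.1
    let sl := st.2.2
    let sl := if signal = 1 then (if op ≤ sl then op - tick_val else sl)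
              else (if op ≥ sl then op + tick_val else sl)
    let extreamOp := op
    if signal = 1 then (extreamOp, op - tick_val, sl + tick_val)
    else (extreamOp, op + tick_val, sl - tick_val)

-- First component of the fold, as a closed form in the list length.
theorem pvFold_fst (signal tick_val : Int) :
    ∀ (l : List Int) (e op sl : Int),
      (l.foldl (pvBody signal tick_val) (e, op, sl)).1 =
        if l.isEmpty then e
        else op + ((l.length : Int) - 1) * (if signal = 1 then -tick_val else tick_val) := by
  intro l
  induction l with
  | nil => intro e op sl; simp
  | cons a t ih =>
    intro e op sl
    by_cases hs : signal = 1
    · subst hs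
      have hstep : pvBody 1 tick_val (e, op, sl) a =
          (op, op - tick_val, (if op ≤ sl then op - tick_val else sl) + tick_val) := by
        simp [pvBody]
      rw [List.foldl_cons, hstep, ih]
      cases ht : t.isEmpty <;> simp_all [List.isEmpty_iff] <;> push_cast <;> ring
    · have hstep : pvBody signal tick_val (e, op, sl) a =
          (op, op + tick_val, (if op ≥ sl then op + tick_val else sl) - tick_val) := by
        simp [pvBody, hs]
      rw [List.foldl_cons, hstep, ih]
      cases ht : t.isEmpty <;> simp_all [List.isEmpty_iff] <;> push_cast <;> ring

theorem pvGetExtreamOp_eq (signal vol op sl tick_val : Int) :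
    GetExtreamOp signal vol op sl tick_val = GetExtreamOp_alt signal vol op sl tick_val := by
  unfold GetExtreamOp GetExtreamOp_alt
  have hb : (PySem.List.pyRange 1 (vol + 1) 1).foldl
      (fun (st : Int × Int × Int) _ =>
        let extreamOp := st.1
        let op := st.2.1
        let sl := st.2.2
        let sl := if signal = 1 then (if op ≤ sl then op - tick_val else sl)
                  else (if op ≥ sl then op + tick_val else sl)
        let extreamOp := op
        if signal = 1 then (extreamOp, op - tick_val, sl + tick_val)
        else (extreamOp, op + tick_val, sl - tick_val))
      (op, op, sl) = (PySem.List.pyRange 1 (vol + 1) 1).foldl (pvBody signal tick_val) (op, op, sl) := rfl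
  simp only [hb]
  rw [pvFold_fst]
  have hlen : ((PySem.List.pyRange 1 (vol + 1) 1).length : Int) = max 0 vol := by
    rw [PySem.List.length_pyRange_one]
    omega
  by_cases hv : vol < 1
  · have : (PySem.List.pyRange 1 (vol + 1) 1).isEmpty = true := by
      rw [PySem.List.pyRange_one_eq_nil (by omega)]; rfl
    simp [this, hv]
  · have hne : (PySem.List.pyRange 1 (vol + 1) 1).isEmpty = false := by
      rw [List.isEmpty_eq_false_iff, ← List.length_pos_iff, PySem.List.length_pyRange_one]
      omega
    simp only [hne, if_neg hv, Bool.false_eq_true, if_false, hlen]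
    have : max 0 vol = vol := by omega
    rw [this]

-- ===== VERDICT (by name: the statement is the Claim_ definition above) =====
theorem GetExtreamOp_spec : Claim_equal_GetExtreamOp := by
  intro signal vol op sl tick_val _
  exact pvGetExtreamOp_eq signal vol op sl tick_val
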